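-- pv_equiv track=rewrite | github.com/Pedro-V/prog-problems | beecrowd/1321/ad_hoc.py | find_lowest_not_shown
-- ===== SOURCE A (Python) =====
-- NUM_CARDS = 52
--
-- def find_lowest_not_shown(cards, shown):
--     lowest = NUM_CARDS + 1
--     idx = -1
--     for i, card in enumerate(cards):
--         if card < lowest and not shown[i]:
--             lowest = card
--             idx = i
--     return idx
-- ===== SOURCE B (Python) =====
-- def find_lowest_not_shown(cards, shown):
--     for i in sorted(range(len(cards)), key=lambda i: (cards[i], i)):
--         if not shown[i]:
--             return i
--     return -1
-- ===== Notes on version B (the rewrite author's own statement) =====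
-- stated objective: alternative
-- what changed: Replaces the online argmin loop (running lowest/idx state) by sort-then-scan: sort the indices by (card value, index) and return the first unshown one; Pre_ excludes inputs where shown is shorter than cards, on which one of the programs raises IndexError.
-- intended difference: On inputs that have at least one unshown card but where every unshown card's value is >= 53, A returns -1 (its NUM_CARDS+1 sentinel silently ignores such cards) while B returns the index of the lowest unshown card, which is the intended answer to 'find the lowest card not yet shown'. — e.g. on find_lowest_not_shown([60], [false]): A returns -1, B returns 0
-- outside the precondition, e.g. on find_lowest_not_shown([5, 60], [True]): A returns -1, B raises IndexError
import Mathlib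
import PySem

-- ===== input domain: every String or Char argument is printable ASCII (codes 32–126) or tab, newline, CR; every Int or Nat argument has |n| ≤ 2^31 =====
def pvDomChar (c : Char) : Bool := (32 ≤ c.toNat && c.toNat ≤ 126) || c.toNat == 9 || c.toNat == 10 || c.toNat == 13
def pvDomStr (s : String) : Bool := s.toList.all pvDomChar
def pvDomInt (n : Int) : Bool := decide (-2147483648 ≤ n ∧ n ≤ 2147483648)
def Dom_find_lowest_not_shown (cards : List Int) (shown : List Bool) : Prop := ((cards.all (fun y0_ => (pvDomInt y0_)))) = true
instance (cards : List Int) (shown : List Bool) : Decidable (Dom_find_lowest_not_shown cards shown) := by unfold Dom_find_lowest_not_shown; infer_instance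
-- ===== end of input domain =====

-- B sorts the indices by (card value, index) and returns the first unshown one, instead of
-- A's online argmin loop with running (lowest, idx) state; objective: alternative (sort-then-scan).


def NUM_CARDS : Int := 52

-- ===== PORT A =====
-- for i, card in enumerate(cards): if card < lowest and not shown[i]: lowest, idx = card, i
-- shown[i] is read only when card < lowest; out of range (excluded by Pre_) pyGetD's default
-- true makes the branch not fire (A would raise IndexError there).
def find_lowest_not_shown (cards : List Int) (shown : List Bool) : Int :=
  ((PySem.List.enumerate cards).foldl
    (fun (st : Int × Int) (p : Int × Int) =>
      if p.2 < st.1 && !(PySem.List.pyGetD shown p.1 true) then (p.2, p.1) else st)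
    (NUM_CARDS + 1, -1)).2

-- ===== PORT B =====
-- for i in sorted(range(len(cards)), key=lambda i: (cards[i], i)): if not shown[i]: return i
-- return -1        (tuple key → sorted2; the index i drawn from range(len(cards)) is always in
-- range, so pyGetD's default 0 for cards[i] never applies; shown[i] as in port A).
def pvFirstUnshown (shown : List Bool) : List Int → Int
  | [] => -1
  | i :: rest => if !(PySem.List.pyGetD shown i true) then i else pvFirstUnshown shown rest

def find_lowest_not_shown_alt (cards : List Int) (shown : List Bool) : Int :=
  pvFirstUnshown shown
    (PySem.List.sorted2 (PySem.List.pyRange 0 (cards.length : Int) 1)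
      (fun i => PySem.List.pyGetD cards i 0) (fun i => i))

-- ===== PRECONDITION & SPEC =====
-- Pre_ excludes inputs where shown is shorter than cards: there A raises IndexError on some
-- inputs and B on others (B also reads shown[i] for large cards A never looks up); one input
-- excluded although A returns on it is cited in claim.json.
def Pre_find_lowest_not_shown (cards : List Int) (shown : List Bool) : Prop :=
  cards.length ≤ shown.length
instance (cards : List Int) (shown : List Bool) : Decidable (Pre_find_lowest_not_shown cards shown) := by unfold Pre_find_lowest_not_shown; infer_instance

def pvWitness_find_lowest_not_shown : List Int × List Bool := ([5, 60, 3, 3], [false, false, true, false])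

-- On inputs with at least one unshown card where every unshown card's value is ≥ 53, A returns
-- -1 (its NUM_CARDS+1 sentinel silently ignores those cards) while B returns the index of the
-- lowest unshown card, the intended answer to 'find the lowest card not yet shown'.
def D_find_lowest_not_shown (cards : List Int) (shown : List Bool) : Prop :=
  (∃ i ∈ List.range cards.length, shown.getD i true = false) ∧
  (∀ i ∈ List.range cards.length, shown.getD i true = false → 53 ≤ cards.getD i 0)
instance (cards : List Int) (shown : List Bool) : Decidable (D_find_lowest_not_shown cards shown) := by unfold D_find_lowest_not_shown; infer_instance

def Spec_find_lowest_not_shown (cards : List Int) (shown : List Bool) (out : Int) : Prop :=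
  ¬ D_find_lowest_not_shown cards shown → out = find_lowest_not_shown_alt cards shown
instance (cards : List Int) (shown : List Bool) (out : Int) : Decidable (Spec_find_lowest_not_shown cards shown out) := by unfold Spec_find_lowest_not_shown; infer_instance

def pvDiffWitness_find_lowest_not_shown : List Int × List Bool := ([60], [false])
def pvDiffWitnessOut_find_lowest_not_shown : Int × Int := (-1, 0)

-- ===== CLAIM (what is proved, stated in full; the proofs are below) =====
def Claim_unchanged_find_lowest_not_shown : Prop := ∀ (cards : List Int) (shown : List Bool), Dom_find_lowest_not_shown cards shown → Pre_find_lowest_not_shown cards shown → Spec_find_lowest_not_shown cards shown (find_lowest_not_shown cards shown)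
def Claim_changed_find_lowest_not_shown : Prop := Dom_find_lowest_not_shown (pvDiffWitness_find_lowest_not_shown.1) (pvDiffWitness_find_lowest_not_shown.2) ∧ Pre_find_lowest_not_shown (pvDiffWitness_find_lowest_not_shown.1) (pvDiffWitness_find_lowest_not_shown.2) ∧ D_find_lowest_not_shown (pvDiffWitness_find_lowest_not_shown.1) (pvDiffWitness_find_lowest_not_shown.2) ∧ find_lowest_not_shown (pvDiffWitness_find_lowest_not_shown.1) (pvDiffWitness_find_lowest_not_shown.2) = pvDiffWitnessOut_find_lowest_not_shown.1 ∧ find_lowest_not_shown_alt (pvDiffWitness_find_lowest_not_shown.1) (pvDiffWitness_find_lowest_not_shown.2) = pvDiffWitnessOut_find_lowest_not_shown.2 ∧ pvDiffWitnessOut_find_lowest_not_shown.1 ≠ pvDiffWitnessOut_find_lowest_not_shown.2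
def Claim_exact_find_lowest_not_shown : Prop := ∀ (cards : List Int) (shown : List Bool), Dom_find_lowest_not_shown cards shown → Pre_find_lowest_not_shown cards shown → D_find_lowest_not_shown cards shown → find_lowest_not_shown cards shown ≠ find_lowest_not_shown_alt cards shown

-- ===== LEMMAS AND PROOFS =====

-- the lexicographic (card value, index) sort key, and the two ports' loop/filter building blocks
def pvKey (cards : List Int) (i : Int) : Lex (Int × Int) := toLex (PySem.List.pyGetD cards i 0, i)

def pvP (shown : List Bool) (i : Int) : Prop := PySem.List.pyGetD shown i true = false

def pvStepA (shown : List Bool) (st : Int × Int) (p : Int × Int) : Int × Int :=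
  if p.2 < st.1 && !(PySem.List.pyGetD shown p.1 true) then (p.2, p.1) else st

lemma pvStepA_fire (shown : List Bool) (st : Int × Int) (p : Int × Int)
    (h1 : p.2 < st.1) (h2 : pvP shown p.1) : pvStepA shown st p = (p.2, p.1) := by
  unfold pvStepA pvP at *
  rw [if_pos (by simp [h1, h2])]

lemma pvStepA_skip (shown : List Bool) (st : Int × Int) (p : Int × Int)
    (h : ¬(p.2 < st.1 ∧ pvP shown p.1)) : pvStepA shown st p = st := by
  unfold pvStepA pvP at *
  rw [if_neg]
  intro hc
  simp only [Bool.and_eq_true, decide_eq_true_eq, Bool.not_eq_eq_eq_not, Bool.not_true] at hc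
  exact h ⟨hc.1, by simpa using hc.2⟩

-- sorted2 with keys (cards[i], i) is sorted with the lexicographic pvKey
lemma pvSorted2_eq (cards xs : List Int) :
    PySem.List.sorted2 xs (fun i => PySem.List.pyGetD cards i 0) (fun i => i)
      = PySem.List.sorted xs (pvKey cards) := by
  rw [PySem.List.sorted_eq_foldl_insertBy]
  unfold PySem.List.sorted2
  simp only [if_neg (by decide : ¬ (false = true))]
  congr 1
  funext acc x
  congr 1
  funext a b
  rcases lt_trichotomy (PySem.List.pyGetD cards a 0) (PySem.List.pyGetD cards b 0) with h | h | h
  · simp [pvKey, Prod.Lex.lt_iff, h]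
  · simp [pvKey, Prod.Lex.lt_iff, h]
  · simp [pvKey, Prod.Lex.lt_iff, h, not_lt_of_gt h, ne_of_gt h]

-- B's scan on a strictly key-sorted list returns a member that is unshown and key-minimal
lemma pvFirst_found (cards : List Int) (shown : List Bool) (l : List Int)
    (hpw : l.Pairwise (fun a b => pvKey cards a < pvKey cards b))
    (hex : ∃ i ∈ l, pvP shown i) :
    pvFirstUnshown shown l ∈ l ∧ pvP shown (pvFirstUnshown shown l) ∧
      ∀ i ∈ l, pvP shown i → pvKey cards (pvFirstUnshown shown l) ≤ pvKey cards i := by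
  induction l with
  | nil => simp at hex
  | cons a t ih =>
    rw [List.pairwise_cons] at hpw
    by_cases ha : pvP shown a
    · have heq : pvFirstUnshown shown (a :: t) = a := by
        unfold pvP at ha
        simp [pvFirstUnshown, ha]
      refine ⟨by simp [heq], by rwa [heq], ?_⟩
      intro i hi _
      rw [heq]
      rcases List.mem_cons.mp hi with rfl | hit
      · exact le_refl _
      · exact le_of_lt (hpw.1 i hit)
    · have heq : pvFirstUnshown shown (a :: t) = pvFirstUnshown shown t := by
        unfold pvP at ha
        simp only [pvFirstUnshown, Bool.not_eq_eq_eq_not, Bool.not_true]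
        rw [if_neg (by simpa using ha)]
      have hex' : ∃ i ∈ t, pvP shown i := by
        rcases hex with ⟨i, hi, hPi⟩
        rcases List.mem_cons.mp hi with rfl | hit
        · exact absurd hPi ha
        · exact ⟨i, hit, hPi⟩
      obtain ⟨h1, h2, h3⟩ := ih hpw.2 hex'
      refine ⟨by rw [heq]; exact List.mem_cons_of_mem _ h1, by rwa [heq], ?_⟩
      intro i hi hPi
      rw [heq]
      rcases List.mem_cons.mp hi with rfl | hit
      · exact absurd hPi ha
      · exact h3 i hit hPi

lemma pvFirst_none (shown : List Bool) (l : List Int)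
    (h : ∀ i ∈ l, ¬ pvP shown i) : pvFirstUnshown shown l = -1 := by
  induction l with
  | nil => rfl
  | cons a t ih =>
    have ha : ¬ pvP shown a := h a (by simp)
    unfold pvP at ha
    simp only [pvFirstUnshown, Bool.not_eq_eq_eq_not, Bool.not_true] at *
    rw [if_neg (by simpa using ha)]
    exact ih (fun i hi => h i (List.mem_cons_of_mem _ hi))

-- A's fold never fires when no remaining card beats the running lowest
lemma pvFoldA_none (shown : List Bool) (cs : List Int) :
    ∀ (j : Nat) (lo idx : Int),
      (∀ k : Nat, k < cs.length → ¬(cs.getD k 0 < lo ∧ pvP shown ((j : Int) + k))) →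
      (PySem.List.enumerate cs (j : Int)).foldl (pvStepA shown) (lo, idx) = (lo, idx) := by
  induction cs with
  | nil => intro j lo idx _; simp [PySem.List.enumerate_nil]
  | cons c t ih =>
    intro j lo idx h
    rw [PySem.List.enumerate_cons, List.foldl_cons]
    have h0 := h 0 (by simp)
    simp only [List.getD_cons_zero, Nat.cast_zero, add_zero] at h0
    rw [pvStepA_skip shown _ _ h0]
    have : ((j : Int) + 1) = ((j + 1 : Nat) : Int) := by push_cast; ring
    rw [this]
    refine ih (j + 1) lo idx ?_
    intro k hk hc
    refine h (k + 1) (by simpa using Nat.succ_lt_succ hk) ?_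
    simpa [List.getD_cons_succ, add_comm, add_left_comm, add_assoc] using hc

-- A's fold lands on m when (cm, m) is the lexicographic minimum of the qualifying candidates
lemma pvFoldA_found (shown : List Bool) (m cm : Int) (cs : List Int) :
    ∀ (j : Nat) (lo idx : Int),
      (∃ k : Nat, k < cs.length ∧ m = (j : Int) + k ∧ cm = cs.getD k 0) →
      cm < lo → pvP shown m →
      (∀ k : Nat, k < cs.length → cs.getD k 0 < lo → pvP shown ((j : Int) + k) →
          cm < cs.getD k 0 ∨ (cm = cs.getD k 0 ∧ m ≤ (j : Int) + k)) →
      ((PySem.List.enumerate cs (j : Int)).foldl (pvStepA shown) (lo, idx)).2 = m := by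
  induction cs with
  | nil => rintro j lo idx ⟨k, hk, _⟩ _ _ _; simp at hk
  | cons c t ih =>
    rintro j lo idx ⟨k, hk, hm, hcm⟩ hlt hPm hmin
    rw [PySem.List.enumerate_cons, List.foldl_cons]
    have hcast : ((j : Int) + 1) = ((j + 1 : Nat) : Int) := by push_cast; ring
    by_cases hfire : c < lo ∧ pvP shown (j : Int)
    · rw [pvStepA_fire shown _ ((j : Int), c) hfire.1 hfire.2]
      have hhead := hmin 0 (by simp) (by simpa using hfire.1) (by simpa using hfire.2)
      simp only [List.getD_cons_zero, Nat.cast_zero, add_zero] at hhead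
      by_cases hmj : m = (j : Int)
      · -- m is the head; nothing later fires against the new lowest c
        have hk0 : k = 0 := by omega
        subst hk0
        simp only [List.getD_cons_zero] at hcm
        rw [hcast, pvFoldA_none shown t (j + 1) c (j : Int) ?_]
        · exact hmj.symm
        · intro k' hk'
          rintro ⟨hc1, hc2⟩
          have := hmin (k' + 1) (by simpa using Nat.succ_lt_succ hk')
            (by simp only [List.getD_cons_succ]; exact lt_trans hc1 hfire.1)
            (by push_cast; push_cast at hc2
                simpa [add_comm, add_left_comm, add_assoc] using hc2)
          simp only [List.getD_cons_succ] at this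
          rcases this with h | h
          · omega
          · omega
      · -- m lies in the tail; recurse with the new state (c, j)
        obtain ⟨k', rfl⟩ : ∃ k', k = k' + 1 := by
          refine ⟨k - 1, ?_⟩
          rcases Nat.eq_zero_or_pos k with rfl | h
          · exact absurd (by simpa using hm) hmj
          · omega
        simp only [List.getD_cons_succ] at hcm
        have hcmc : cm < c := by
          rcases hhead with h | h
          · exact h
          · exfalso; push_cast at hm; omega
        rw [hcast]
        refine ih (j + 1) c (j : Int) ⟨k', by simpa using hk, by push_cast; push_cast at hm; omega, hcm⟩
          hcmc hPm ?_
        intro k2 hk2 hc hP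
        have := hmin (k2 + 1) (by simpa using Nat.succ_lt_succ hk2)
          (by simp only [List.getD_cons_succ]; exact lt_trans hc hfire.1)
          (by push_cast; push_cast at hP; simpa [add_comm, add_left_comm, add_assoc] using hP)
        simp only [List.getD_cons_succ] at this
        push_cast
        push_cast at this
        rcases this with h | h
        · exact Or.inl h
        · exact Or.inr ⟨h.1, by omega⟩
    · -- head does not fire; state unchanged
      rw [pvStepA_skip shown _ _ hfire]
      obtain ⟨k', rfl⟩ : ∃ k', k = k' + 1 := by
        refine ⟨k - 1, ?_⟩
        rcases Nat.eq_zero_or_pos k with rfl | h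
        · exfalso
          simp only [List.getD_cons_zero] at hcm
          exact hfire ⟨by rw [← hcm]; simpa using hlt, by simpa [hm] using hPm⟩
        · omega
      simp only [List.getD_cons_succ] at hcm
      rw [hcast]
      refine ih (j + 1) lo idx ⟨k', by simpa using hk, by push_cast; push_cast at hm; omega, hcm⟩
        hlt hPm ?_
      intro k2 hk2 hc hP
      have := hmin (k2 + 1) (by simpa using Nat.succ_lt_succ hk2)
        (by simpa [List.getD_cons_succ] using hc)
        (by push_cast; push_cast at hP; simpa [add_comm, add_left_comm, add_assoc] using hP)
      simp only [List.getD_cons_succ] at this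
      push_cast
      push_cast at this
      rcases this with h | h
      · exact Or.inl h
      · exact Or.inr ⟨h.1, by omega⟩


-- facts about the sorted index list B scans, and cast bridges between Int and Nat indexing
lemma pvOrd_mem (cards : List Int) (i : Int) :
    i ∈ PySem.List.sorted (PySem.List.pyRange 0 (cards.length : Int) 1) (pvKey cards) ↔
      0 ≤ i ∧ i < (cards.length : Int) := by
  rw [(PySem.List.sorted_perm _ _ _).mem_iff, PySem.List.mem_pyRange_one]

lemma pvKey_inj (cards : List Int) {a b : Int} (h : pvKey cards a = pvKey cards b) : a = b := by
  have := congrArg (fun x => (ofLex x).2) h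
  simpa [pvKey] using this

lemma pvOrd_pairwise (cards : List Int) :
    (PySem.List.sorted (PySem.List.pyRange 0 (cards.length : Int) 1) (pvKey cards)).Pairwise
      (fun a b => pvKey cards a < pvKey cards b) := by
  have h1 := PySem.List.sorted_pairwise (PySem.List.pyRange 0 (cards.length : Int) 1) (pvKey cards)
  have hnd : (PySem.List.sorted (PySem.List.pyRange 0 (cards.length : Int) 1) (pvKey cards)).Nodup := by
    rw [(PySem.List.sorted_perm _ _ _).nodup_iff]
    rw [PySem.List.pyRange_zero_natCast cards.length]
    exact List.nodup_range.map (fun a b hab => by exact_mod_cast hab)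
  exact (h1.and hnd).imp (fun {a b} hab => lt_of_le_of_ne hab.1 (fun he => hab.2 (pvKey_inj cards he)))

lemma pvP_natCast (shown : List Bool) (k : Nat) : pvP shown (k : Int) ↔ shown.getD k true = false := by
  simp [pvP]

lemma pvKey_le_unfold (cards : List Int) {a b : Int}
    (h : pvKey cards a ≤ pvKey cards b) :
    PySem.List.pyGetD cards a 0 < PySem.List.pyGetD cards b 0 ∨
      (PySem.List.pyGetD cards a 0 = PySem.List.pyGetD cards b 0 ∧ a ≤ b) := by
  simpa [pvKey, Prod.Lex.le_iff] using h

-- A's port IS the pvStepA fold (definitional)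
lemma pvA_eq_fold (cards : List Int) (shown : List Bool) :
    find_lowest_not_shown cards shown =
      ((PySem.List.enumerate cards ((0 : Nat) : Int)).foldl (pvStepA shown) (NUM_CARDS + 1, -1)).2 := rfl

-- B's port IS the scan of the pvKey-sorted index list
lemma pvB_eq_scan (cards : List Int) (shown : List Bool) :
    find_lowest_not_shown_alt cards shown =
      pvFirstUnshown shown
        (PySem.List.sorted (PySem.List.pyRange 0 (cards.length : Int) 1) (pvKey cards)) := by
  unfold find_lowest_not_shown_alt
  rw [pvSorted2_eq]

-- ===== VERDICT (by name: the statement is the Claim_ definition above) =====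
theorem find_lowest_not_shown_spec : Claim_unchanged_find_lowest_not_shown := by
  intro cards shown _ hpre
  unfold Spec_find_lowest_not_shown
  intro hnD
  rw [pvA_eq_fold, pvB_eq_scan]
  by_cases hU : ∃ i ∈ PySem.List.sorted (PySem.List.pyRange 0 (cards.length : Int) 1) (pvKey cards), pvP shown i
  · obtain ⟨hrmem, hrP, hrmin⟩ := pvFirst_found cards shown _ (pvOrd_pairwise cards) hU
    set r := pvFirstUnshown shown
      (PySem.List.sorted (PySem.List.pyRange 0 (cards.length : Int) 1) (pvKey cards)) with hrdef
    have hr := (pvOrd_mem cards r).mp hrmem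
    have hrnat : ((r.toNat : Nat) : Int) = r := Int.toNat_of_nonneg hr.1
    have hrlen : r.toNat < cards.length := by omega
    -- from ¬D_: some unshown card has value < 53, hence so has the key-minimal one
    have hD1 : ∃ i ∈ List.range cards.length, shown.getD i true = false := by
      refine ⟨r.toNat, List.mem_range.mpr hrlen, ?_⟩
      rw [← pvP_natCast shown r.toNat, hrnat]
      exact hrP
    have hD2 : ∃ i ∈ List.range cards.length, shown.getD i true = false ∧ cards.getD i 0 < 53 := by
      by_contra hno
      push_neg at hno
      exact hnD ⟨hD1, fun i hi hsi => by have := hno i hi hsi; omega⟩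
    obtain ⟨j0, hj0, hj0s, hj0c⟩ := hD2
    have hj0len := List.mem_range.mp hj0
    have hj0mem : ((j0 : Nat) : Int) ∈ PySem.List.sorted (PySem.List.pyRange 0 (cards.length : Int) 1) (pvKey cards) := by
      rw [pvOrd_mem]
      constructor <;> [exact Int.natCast_nonneg j0; exact_mod_cast hj0len]
    have hj0P : pvP shown ((j0 : Nat) : Int) := (pvP_natCast shown j0).mpr hj0s
    have hcm53 : PySem.List.pyGetD cards r 0 < NUM_CARDS + 1 := by
      rcases pvKey_le_unfold cards (hrmin _ hj0mem hj0P) with h | h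
      · rw [PySem.List.pyGetD_natCast] at h
        unfold NUM_CARDS
        omega
      · rw [PySem.List.pyGetD_natCast] at h
        unfold NUM_CARDS
        omega
    -- A's fold lands exactly on r
    refine pvFoldA_found shown r (PySem.List.pyGetD cards r 0) cards 0 (NUM_CARDS + 1) (-1)
      ⟨r.toNat, hrlen, by push_cast; omega, by conv_lhs => rw [← hrnat, PySem.List.pyGetD_natCast]⟩
      hcm53 hrP ?_
    intro k hk hck hPk
    have hkmem : ((k : Nat) : Int) ∈ PySem.List.sorted (PySem.List.pyRange 0 (cards.length : Int) 1) (pvKey cards) := by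
      rw [pvOrd_mem]
      constructor <;> [exact Int.natCast_nonneg k; exact_mod_cast hk]
    have hPk2 : pvP shown ((k : Nat) : Int) := by
      have hc0 : ((0 : Nat) : Int) + (k : Int) = ((k : Nat) : Int) := by push_cast; ring
      rwa [hc0] at hPk
    rcases pvKey_le_unfold cards (hrmin _ hkmem hPk2) with h | h
    · rw [PySem.List.pyGetD_natCast] at h
      exact Or.inl h
    · rw [PySem.List.pyGetD_natCast] at h
      exact Or.inr ⟨h.1, by push_cast; omega⟩
  · push_neg at hU
    rw [pvFirst_none shown _ hU]
    rw [pvFoldA_none shown cards 0 (NUM_CARDS + 1) (-1) ?_]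
    intro k hk
    rintro ⟨_, hP⟩
    have hkmem : ((k : Nat) : Int) ∈ PySem.List.sorted (PySem.List.pyRange 0 (cards.length : Int) 1) (pvKey cards) := by
      rw [pvOrd_mem]
      constructor <;> [exact Int.natCast_nonneg k; exact_mod_cast hk]
    refine hU _ hkmem ?_
    have hc0 : ((0 : Nat) : Int) + (k : Int) = ((k : Nat) : Int) := by push_cast; ring
    rwa [hc0] at hP

theorem find_lowest_not_shown_changed : Claim_changed_find_lowest_not_shown := by
  unfold Claim_changed_find_lowest_not_shown; decide

theorem find_lowest_not_shown_tight : Claim_exact_find_lowest_not_shown := by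
  intro cards shown _ hpre hD
  obtain ⟨⟨i0, hi0, hi0s⟩, hall⟩ := hD
  rw [pvA_eq_fold, pvB_eq_scan]
  have hU : ∃ i ∈ PySem.List.sorted (PySem.List.pyRange 0 (cards.length : Int) 1) (pvKey cards), pvP shown i := by
    refine ⟨((i0 : Nat) : Int), ?_, (pvP_natCast shown i0).mpr hi0s⟩
    rw [pvOrd_mem]
    constructor <;> [exact Int.natCast_nonneg i0; exact_mod_cast List.mem_range.mp hi0]
  obtain ⟨hrmem, _, _⟩ := pvFirst_found cards shown _ (pvOrd_pairwise cards) hU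
  have hr := (pvOrd_mem cards _).mp hrmem
  rw [pvFoldA_none shown cards 0 (NUM_CARDS + 1) (-1) ?_]
  · omega
  · intro k hk
    rintro ⟨hck, hPk⟩
    have hc0 : ((0 : Nat) : Int) + (k : Int) = ((k : Nat) : Int) := by push_cast; ring
    rw [hc0, pvP_natCast] at hPk
    have := hall k (List.mem_range.mpr hk) hPk
    unfold NUM_CARDS at hck
    omega
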